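-- pv_equiv track=rewrite | github.com/Andres-Casillas/RubikSolver | python/cube.py | simplificar
-- ===== SOURCE A (Python) =====
-- from collections import deque
--
-- def simplificar(moves):
--     simples = deque()
--
--     i = 0
--     while i < len(moves):
--         face = moves[i].replace("'", "").replace("2", "")
--         count = 0
--         while i < len(moves) and moves[i].replace("'", "").replace("2", "") == face:
--             move = moves[i]
--             if move.endswith("'"):
--                 count -= 1
--             elif move.endswith("2"):
--                 count += 2
--             else:
--                 count += 1
--             i += 1
--
--         count = count % 4
--         if count == 1:
--             simples.append(face)
--         elif count == 2:
--             simples.append(face + "2")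
--         elif count == 3:
--             simples.append(face + "'")
--
--     return list(simples)
-- ===== SOURCE B (Python) =====
-- from collections import deque
--
-- def simplificar(moves):
--     # stage 1: run-length encode into (face, signed quarter-turn total) pairs,
--     # scanning RIGHT-TO-LEFT and merging at the front of a deque
--     runs = deque()
--     for m in reversed(moves):
--         f = m.replace("'", "").replace("2", "")
--         d = -1 if m.endswith("'") else 2 if m.endswith("2") else 1
--         if runs and runs[0][0] == f:
--             runs[0] = (f, d + runs[0][1])
--         else:
--             runs.appendleft((f, d))
--     # stage 2: emit one move per run whose net turn is not a multiple of 4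
--     return [f + ("", "2", "'")[c % 4 - 1] for f, c in runs if c % 4]
-- ===== Notes on version B (the rewrite author's own statement) =====
-- stated objective: alternative
-- what changed: Replaced A's index-advancing outer/inner while loops by two staged passes: a right-to-left scan that run-length-encodes the moves into (face, signed count) pairs merged at the front of a deque, then a comprehension that emits one canonical move per run with nonzero net turn mod 4.
import Mathlib
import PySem

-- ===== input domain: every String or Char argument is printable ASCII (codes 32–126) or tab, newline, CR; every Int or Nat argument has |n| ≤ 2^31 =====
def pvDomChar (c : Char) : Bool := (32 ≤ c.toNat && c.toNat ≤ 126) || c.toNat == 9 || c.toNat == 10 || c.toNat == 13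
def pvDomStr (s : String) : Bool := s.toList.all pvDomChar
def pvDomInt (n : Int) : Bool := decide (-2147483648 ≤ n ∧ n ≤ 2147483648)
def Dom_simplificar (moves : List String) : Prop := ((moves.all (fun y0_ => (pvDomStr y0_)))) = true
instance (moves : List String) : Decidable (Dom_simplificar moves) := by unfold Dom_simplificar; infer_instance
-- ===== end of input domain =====

-- B replaces A's index-advancing nested while loops by two staged passes: a right-to-left
-- run-length encoding into (face, signed count) pairs, then an emit pass; objective: alternative.

-- shared helpers: the face key and the signed delta of one move (both ports compute
-- exactly these Python expressions: m.replace("'","").replace("2","") and the -1/2/1 choice)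
def pvKey (m : String) : String := PySem.Str.replace (PySem.Str.replace m "'" "") "2" ""
def pvDelta (m : String) : Int :=
  if PySem.Str.endswith m "'" then -1 else if PySem.Str.endswith m "2" then 2 else 1

-- ===== PORT A =====
-- A's inner while loop: consume moves while their face key equals `face`, accumulating count
def runA : List String → Int → String → Int × List String
  | [], count, _ => (count, [])
  | m :: rest, count, face =>
    if pvKey m = face then runA rest (count + pvDelta m) face else (count, m :: rest)

-- needed by simplificar's termination (the inner loop returns a suffix)
theorem runA_len : ∀ (l : List String) (c : Int) (f : String), (runA l c f).2.length ≤ l.length := by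
  intro l
  induction l with
  | nil => intro c f; simp [runA]
  | cons m rest ih =>
    intro c f
    simp only [runA]
    split
    · exact le_trans (ih _ _) (Nat.le_succ _)
    · simp

-- A's emission of one simplified run (count already reduced mod 4)
def emitA (face : String) (c : Int) : List String :=
  if c = 1 then [face] else if c = 2 then [face ++ "2"] else if c = 3 then [face ++ "'"] else []

def simplificar (moves : List String) : List String :=
  match moves with
  | [] => []
  | m :: rest =>
    let face := pvKey m
    let p := runA rest (pvDelta m) face   -- first inner-loop iteration always matches face
    emitA face (PySem.Int.mod p.1 4) ++ simplificar p.2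
termination_by moves.length
decreasing_by
  simp only [List.length_cons]
  exact Nat.lt_succ_of_le (runA_len rest (pvDelta m) (pvKey m))

-- ===== PORT B =====
-- one iteration of Source B's reversed-scan loop: merge move m onto the front of runs
def stepR (m : String) (runs : List (String × Int)) : List (String × Int) :=
  match runs with
  | (f, c) :: rest =>
    if f = pvKey m then (f, pvDelta m + c) :: rest
    else (pvKey m, pvDelta m) :: (f, c) :: rest
  | [] => [(pvKey m, pvDelta m)]

-- ("", "2", "'")[r - 1] for r = 1, 2, 3
def sfxB (r : Int) : String := if r = 1 then "" else if r = 2 then "2" else "'"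

def simplificar_alt (moves : List String) : List String :=
  -- stage 1: `for m in reversed(moves): runs = stepR m runs`
  let runs := moves.reverse.foldl (fun runs m => stepR m runs) []
  -- stage 2: the comprehension `[f + ("","2","'")[c%4-1] for f, c in runs if c % 4]`
  (runs.filter (fun p => PySem.Int.mod p.2 4 != 0)).map
    (fun p => p.1 ++ sfxB (PySem.Int.mod p.2 4))

-- ===== PRECONDITION & SPEC =====
def Spec_simplificar (moves : List String) (out : List String) : Prop := out = simplificar_alt moves
instance (moves : List String) (out : List String) : Decidable (Spec_simplificar moves out) := by unfold Spec_simplificar; infer_instance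

-- ===== CLAIM (what is proved, stated in full; the proofs are below) =====
def Claim_equal_simplificar : Prop := ∀ (moves : List String), Dom_simplificar moves → Spec_simplificar moves (simplificar moves)

-- ===== LEMMAS AND PROOFS =====

-- stage 2 of B as a named function
def outB (runs : List (String × Int)) : List String :=
  (runs.filter (fun p => PySem.Int.mod p.2 4 != 0)).map
    (fun p => p.1 ++ sfxB (PySem.Int.mod p.2 4))

-- stepR with the key/delta abstracted to an arbitrary (face, count) pair
def mergeFront (f : String) (c : Int) (runs : List (String × Int)) : List (String × Int) :=
  match runs with
  | (g, d) :: rest => if g = f then (g, c + d) :: rest else (f, c) :: (g, d) :: rest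
  | [] => [(f, c)]

theorem stepR_eq (m : String) (runs : List (String × Int)) :
    stepR m runs = mergeFront (pvKey m) (pvDelta m) runs := by
  unfold stepR mergeFront
  match runs with
  | [] => rfl
  | (g, d) :: rest => simp only []

theorem encode_eq (moves : List String) :
    moves.reverse.foldl (fun runs m => stepR m runs) [] = moves.foldr stepR [] := by
  rw [List.foldl_reverse]

theorem outB_cons (f : String) (c : Int) (rs : List (String × Int)) :
    outB ((f, c) :: rs) = emitA f (PySem.Int.mod c 4) ++ outB rs := by
  have hm : PySem.Int.mod c 4 = c % 4 := PySem.Int.mod_eq_emod_of_pos (by norm_num)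
  have h0 : 0 ≤ c % 4 := Int.emod_nonneg c (by norm_num)
  have h4 : c % 4 < 4 := Int.emod_lt_of_pos c (by norm_num)
  unfold outB emitA sfxB
  rw [List.filter_cons]
  have hc : c % 4 = 0 ∨ c % 4 = 1 ∨ c % 4 = 2 ∨ c % 4 = 3 := by omega
  rcases hc with h | h | h | h <;> simp [hm, h]

theorem mergeFront_merge (f : String) (c d : Int) (rs : List (String × Int)) :
    mergeFront f c (mergeFront f d rs) = mergeFront f (c + d) rs := by
  unfold mergeFront
  match rs with
  | [] => simp
  | (g, e) :: t =>
    by_cases h : g = f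
    · simp [h, add_assoc]
    · simp [h]

-- core invariant: emitting a pending run (face, cnt) merged onto B's encoding of l equals
-- A's handling of that run (its inner loop extends it through l) followed by A on the rest
theorem mergeFront_head (f : String) (c : Int) (rs : List (String × Int)) :
    ∃ c' t, mergeFront f c rs = (f, c') :: t := by
  unfold mergeFront
  match rs with
  | [] => exact ⟨c, [], rfl⟩
  | (g, d) :: t =>
    by_cases h : g = f
    · subst h; exact ⟨c + d, t, by simp⟩
    · exact ⟨c, (g, d) :: t, by simp [h]⟩

-- core invariant: emitting a pending run (face, cnt) merged onto B's encoding of l equals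
-- A's handling of that run (its inner loop extends it through l) followed by A on the rest
theorem outB_mergeFront (l : List String) : ∀ (cnt : Int) (face : String),
    outB (mergeFront face cnt (l.foldr stepR []))
      = emitA face (PySem.Int.mod (runA l cnt face).1 4) ++ simplificar (runA l cnt face).2 := by
  induction l with
  | nil =>
    intro cnt face
    simp only [List.foldr_nil, mergeFront]
    rw [outB_cons]
    simp [runA, simplificar, outB]
  | cons m rest ih =>
    intro cnt face
    simp only [List.foldr_cons, stepR_eq]
    by_cases h : pvKey m = face
    · rw [h, mergeFront_merge, ih]
      have hr : runA (m :: rest) cnt face = runA rest (cnt + pvDelta m) face := by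
        simp [runA, h]
      rw [hr]
    · obtain ⟨c', t, ht⟩ := mergeFront_head (pvKey m) (pvDelta m) (rest.foldr stepR [])
      have hm : mergeFront face cnt (mergeFront (pvKey m) (pvDelta m) (rest.foldr stepR []))
          = (face, cnt) :: mergeFront (pvKey m) (pvDelta m) (rest.foldr stepR []) := by
        rw [ht]; unfold mergeFront; simp [h]
      have hA : simplificar (m :: rest)
          = emitA (pvKey m) (PySem.Int.mod (runA rest (pvDelta m) (pvKey m)).1 4)
            ++ simplificar (runA rest (pvDelta m) (pvKey m)).2 := by
        rw [simplificar]
      rw [hm, outB_cons, ih (pvDelta m) (pvKey m), ← hA]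
      have hr : runA (m :: rest) cnt face = (cnt, m :: rest) := by
        simp [runA, h]
      rw [hr]

-- ===== VERDICT (by name: the statement is the Claim_ definition above) =====
theorem simplificar_spec : Claim_equal_simplificar := by
  unfold Claim_equal_simplificar
  intro moves _
  unfold Spec_simplificar simplificar_alt
  rw [encode_eq]
  show simplificar moves = outB (moves.foldr stepR [])
  match moves with
  | [] => simp [simplificar, outB]
  | m :: rest =>
    rw [simplificar]
    simp only [List.foldr_cons, stepR_eq]
    rw [outB_mergeFront]
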